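-- pv_equiv track=rewrite | github.com/abelvanbergen/AdventofCode | 2020/day14/ex02.py | set_all_values
-- ===== SOURCE A (Python) =====
-- def set_all_values(number, value, mem):
-- 	amount = number.count('X')
-- 	format_nb = "0" + str(amount) + "b"
-- 	for i in range(2 ** amount):
-- 		bin_nb = format(i, format_nb)
-- 		nb = 0
-- 		at_x = 0
-- 		for char in number:
-- 			if char == 'X':
-- 				nb = nb * 2 + int(bin_nb[at_x])
-- 				at_x += 1
-- 			else:
-- 				nb = nb * 2 + int(char)
-- 		mem[nb] = value
-- 	return(mem)
-- ===== SOURCE B (Python) =====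
-- def set_all_values(number, value, mem):
--     # Breadth-first expansion: one left-to-right pass over the mask grows the
--     # list of all addresses directly (branching at each 'X'), instead of
--     # re-formatting and re-parsing the whole mask 2**amount times.
--     # Mutates mem in place, like the original.
--     addrs = [0]
--     for ch in number:
--         if ch == 'X':
--             addrs = [a for p in addrs for a in (p * 2, p * 2 + 1)]
--         else:
--             d = int(ch)
--             addrs = [p * 2 + d for p in addrs]
--     for a in addrs:
--         mem[a] = value
--     return mem
-- ===== Notes on version B (the rewrite author's own statement) =====
-- stated objective: faster
-- what changed: Instead of iterating i over range(2**amount) and re-formatting/re-parsing the whole mask string for each i, B makes one left-to-right pass over the mask that breadth-first-expands the list of all addresses (doubling it at each 'X'), then writes every address; the write order (leftmost X = MSB, counting up) is identical.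
import Mathlib
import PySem

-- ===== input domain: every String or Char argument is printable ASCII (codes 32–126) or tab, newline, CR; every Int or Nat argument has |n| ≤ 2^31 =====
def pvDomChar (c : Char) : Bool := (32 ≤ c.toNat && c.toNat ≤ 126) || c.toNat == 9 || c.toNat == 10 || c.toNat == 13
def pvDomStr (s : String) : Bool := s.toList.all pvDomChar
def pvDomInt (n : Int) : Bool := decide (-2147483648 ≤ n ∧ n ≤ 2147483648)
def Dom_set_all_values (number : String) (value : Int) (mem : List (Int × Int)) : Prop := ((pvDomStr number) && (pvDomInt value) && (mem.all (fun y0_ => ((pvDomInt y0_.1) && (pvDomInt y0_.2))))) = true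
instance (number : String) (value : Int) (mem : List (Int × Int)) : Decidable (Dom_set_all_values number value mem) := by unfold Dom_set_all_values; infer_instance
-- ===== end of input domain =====

-- B replaces A's per-index format/re-parse of the mask by one breadth-first expansion
-- pass that builds all addresses directly (objective: faster by a constant factor
-- mechanism: no per-index format/int parsing; not measured).
-- Both Pythons mutate `mem` in place identically; the equivalence below is about the
-- returned dict (ported as its item list).

-- ===== PORT A =====

-- int(c) for a single character: exact on digit characters '0'..'9', which Pre_
-- guarantees (on any other character Python's int raises ValueError).
def pvDigit (c : Char) : Int := (c.toNat : Int) - 48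

-- body of A's inner `for char in number` loop; state = (nb, at_x).
-- bin_nb[at_x]: at_x < len(bin) always holds here (at_x < amount ≤ len(bin)),
-- so the total pyGetD form is exact.
def pvStepA (bin : List Char) (st : Int × Nat) (c : Char) : Int × Nat :=
  if c = 'X' then
    (st.1 * 2 + pvDigit (PySem.List.pyGetD bin (st.2 : Int) '0'), st.2 + 1)
  else
    (st.1 * 2 + pvDigit c, st.2)

def set_all_values (number : String) (value : Int) (mem : List (Int × Int)) : List (Int × Int) :=
  let amount : Nat := PySem.Str.count number "X"
  -- format(i, "0" + str(amount) + "b") = binary digits of i, zero-filled to width amount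
  -- (range(2**amount) yields the naturals 0,...,2**amount-1, rendered as List.range)
  ((List.range (2 ^ amount)).foldl
      (fun d (i : Nat) =>
        let bin := PySem.Chars.zfill (PySem.Int.toBinChars (i : Int)) (amount : Int)
        let st := number.toList.foldl (pvStepA bin) ((0 : Int), (0 : Nat))
        d.insert st.1 value)
      (PySem.Dict.mk mem)).items

-- ===== PORT B =====

-- body of B's expansion loop over the mask characters
def pvStepB (addrs : List Int) (ch : Char) : List Int :=
  if ch = 'X' then addrs.flatMap (fun p => [p * 2, p * 2 + 1])
  else addrs.map (fun p => p * 2 + pvDigit ch)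

def set_all_values_alt (number : String) (value : Int) (mem : List (Int × Int)) : List (Int × Int) :=
  let addrs := number.toList.foldl pvStepB [(0 : Int)]
  (addrs.foldl (fun d a => d.insert a value) (PySem.Dict.mk mem)).items

-- ===== PRECONDITION & SPEC =====

-- Pre_ excludes exactly the inputs on which Python A raises: a mask character that is
-- neither a digit nor 'X' makes int(char) raise ValueError (B's int(ch) raises there too).
def Pre_set_all_values (number : String) (value : Int) (mem : List (Int × Int)) : Prop :=
  number.toList.all (fun c => (48 ≤ c.toNat && c.toNat ≤ 57) || c == 'X') = true
instance (number : String) (value : Int) (mem : List (Int × Int)) : Decidable (Pre_set_all_values number value mem) := by unfold Pre_set_all_values; infer_instance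

def pvWitness_set_all_values : String × Int × (List (Int × Int)) := ("X1", 7, [(0, 2)])

def Spec_set_all_values (number : String) (value : Int) (mem : List (Int × Int)) (out : List (Int × Int)) : Prop := out = set_all_values_alt number value mem
instance (number : String) (value : Int) (mem : List (Int × Int)) (out : List (Int × Int)) : Decidable (Spec_set_all_values number value mem out) := by unfold Spec_set_all_values; infer_instance

-- ===== CLAIM (what is proved, stated in full; the proofs are below) =====
def Claim_equal_set_all_values : Prop := ∀ (number : String) (value : Int) (mem : List (Int × Int)), Dom_set_all_values number value mem → Pre_set_all_values number value mem → Spec_set_all_values number value mem (set_all_values number value mem)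

-- ===== LEMMAS AND PROOFS =====

-- the width-t binary string of i, MSB first (what format(i, "0tb") produces for i < 2^t)
def pvBits (t i : Nat) : List Char :=
  (List.range t).map (fun k => if (i >>> (t - 1 - k)) % 2 == 1 then '1' else '0')

theorem pvBits_length (t i : Nat) : (pvBits t i).length = t := by
  simp [pvBits]

theorem pvBits_succ (t q : Nat) :
    pvBits (t + 1) q = pvBits t (q / 2) ++ [if q % 2 == 1 then '1' else '0'] := by
  unfold pvBits
  rw [List.range_succ, List.map_append]
  congr 1
  · apply List.map_congr_left
    intro k hk
    have hk' : k < t := List.mem_range.mp hk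
    have h1 : t + 1 - 1 - k = 1 + (t - 1 - k) := by omega
    rw [h1, Nat.shiftRight_add, Nat.shiftRight_one]
  · simp

theorem pvBits_zero_val (t : Nat) : pvBits t 0 = List.replicate t '0' := by
  unfold pvBits
  rw [List.eq_replicate_iff]
  simp [Nat.zero_shiftRight]

-- str.count with the single-character needle "X" counts the 'X' characters
theorem pvCountGo (fuel : Nat) : ∀ (l : List Char) (acc : Nat), l.length ≤ fuel →
    PySem.Chars.count.go ['X'] fuel l acc = acc + l.count 'X' := by
  induction fuel with
  | zero =>
    intro l acc h
    have : l = [] := List.eq_nil_of_length_eq_zero (by omega)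
    subst this
    rw [PySem.Chars.count.go]
    simp
  | succ fuel ih =>
    intro l acc h
    cases l with
    | nil => rw [PySem.Chars.count.go] <;> simp
    | cons c t =>
      rw [PySem.Chars.count.go]
      by_cases hc : c = 'X'
      · subst hc
        rw [if_pos (by simp [List.isPrefixOf])]
        simp only [List.length_nil, List.drop_zero, List.length_cons, List.drop_succ_cons]
        rw [ih t (acc + 1) (by simpa using Nat.le_of_succ_le_succ h)]
        simp
        omega
      · rw [if_neg (by simp [List.isPrefixOf]; exact fun hxc => absurd hxc.symm hc)]
        rw [ih t acc (by simpa using Nat.le_of_succ_le_succ h)]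
        simp [hc]

theorem pvCountX (s : String) : PySem.Str.count s "X" = s.toList.count 'X' := by
  rw [PySem.Str.count_eq]
  have hX : ("X" : String).toList = ['X'] := rfl
  rw [hX]
  unfold PySem.Chars.count
  rw [if_neg (by simp)]
  rw [pvCountGo _ _ _ (le_refl _)]
  simp

-- Nat.toDigits 2: accumulator, fuel irrelevance, unfolding step, digit shape
theorem pvToDigitsCore_acc (b : Nat) : ∀ (f n : Nat) (acc : List Char),
    Nat.toDigitsCore b f n acc = Nat.toDigitsCore b f n [] ++ acc := by
  intro f
  induction f with
  | zero => intro n acc; simp [Nat.toDigitsCore]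
  | succ f ih =>
    intro n acc
    rw [Nat.toDigitsCore, Nat.toDigitsCore]
    by_cases h : n / b = 0
    · simp [h]
    · rw [if_neg h, if_neg h, ih (n / b) (Nat.digitChar (n % b) :: acc),
        ih (n / b) [Nat.digitChar (n % b)]]
      simp

theorem pvToDigitsCore_fuel : ∀ (f f' n : Nat) (acc : List Char), n < f → n < f' →
    Nat.toDigitsCore 2 f n acc = Nat.toDigitsCore 2 f' n acc := by
  intro f
  induction f with
  | zero => intro f' n acc h _; omega
  | succ f ih =>
    intro f' n acc h h'
    cases f' with
    | zero => omega
    | succ f' =>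
      rw [Nat.toDigitsCore, Nat.toDigitsCore]
      by_cases h0 : n / 2 = 0
      · simp [h0]
      · rw [if_neg h0, if_neg h0]
        have hn2 : n / 2 < n := Nat.div_lt_self (by omega) (by omega)
        exact ih f' (n / 2) _ (by omega) (by omega)

theorem pvToDigits_two_step (n : Nat) (h : 2 ≤ n) :
    Nat.toDigits 2 n = Nat.toDigits 2 (n / 2) ++ [Nat.digitChar (n % 2)] := by
  unfold Nat.toDigits
  rw [Nat.toDigitsCore]
  have h0 : ¬ n / 2 = 0 := by omega
  rw [if_neg h0]
  have hn2 : n / 2 < n := Nat.div_lt_self (by omega) (by omega)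
  rw [pvToDigitsCore_fuel n (n / 2 + 1) (n / 2) _ (by omega) (by omega),
    pvToDigitsCore_acc]

theorem pvToDigits_mem (n : Nat) : ∀ c ∈ Nat.toDigits 2 n, c = '0' ∨ c = '1' := by
  induction n using Nat.strong_induction_on with
  | _ n ih =>
    by_cases h2 : n < 2
    · interval_cases n
      · intro c hc
        have h0 : Nat.toDigits 2 0 = ['0'] := rfl
        rw [h0] at hc; left; simpa using hc
      · intro c hc
        have h1 : Nat.toDigits 2 1 = ['1'] := rfl
        rw [h1] at hc; right; simpa using hc
    · rw [pvToDigits_two_step n (by omega)]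
      intro c hc
      rcases List.mem_append.mp hc with h | h
      · exact ih (n / 2) (Nat.div_lt_self (by omega) (by omega)) c h
      · rcases List.mem_singleton.mp h with rfl
        rcases Nat.mod_two_eq_zero_or_one n with hm | hm <;> rw [hm] <;> simp [Nat.digitChar]

theorem pvToDigits_ne_nil (n : Nat) : Nat.toDigits 2 n ≠ [] := by
  by_cases h2 : n < 2
  · interval_cases n
    · have h0 : Nat.toDigits 2 0 = ['0'] := rfl
      simp [h0]
    · have h1 : Nat.toDigits 2 1 = ['1'] := rfl
      simp [h1]
  · rw [pvToDigits_two_step n (by omega)]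
    simp

-- zfill of the binary digits is pad-with-zeros (no sign character is present)
theorem pvZfill_eq (i t : Nat) :
    PySem.Chars.zfill (PySem.Int.toBinChars (i : Int)) (t : Int) =
      List.replicate (t - (Nat.toDigits 2 i).length) '0' ++ Nat.toDigits 2 i := by
  have hnb : PySem.Int.toBinChars ((i : Nat) : Int) = Nat.toDigits 2 i := by
    unfold PySem.Int.toBinChars
    rw [if_neg (by omega)]
    simp
  rw [hnb]
  unfold PySem.Chars.zfill
  by_cases hle : (t : Int) ≤ ((Nat.toDigits 2 i).length : Int)
  · rw [if_pos hle]
    have h0 : t - (Nat.toDigits 2 i).length = 0 := by omega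
    rw [h0]
    simp
  · rw [if_neg hle]
    obtain ⟨c, rest, hcs⟩ : ∃ c rest, Nat.toDigits 2 i = c :: rest := by
      cases h : Nat.toDigits 2 i with
      | nil => exact absurd h (pvToDigits_ne_nil i)
      | cons a b => exact ⟨a, b, rfl⟩
    have hc01 : c = '0' ∨ c = '1' :=
      pvToDigits_mem i c (by rw [hcs]; exact List.mem_cons_self)
    have hpm : ¬ (c = '+' ∨ c = '-') := by rcases hc01 with rfl | rfl <;> decide
    rw [hcs]
    dsimp only
    rw [if_neg hpm]
    simp

theorem pvBin_eq (t : Nat) (ht : 1 ≤ t) : ∀ i : Nat, i < 2 ^ t →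
    List.replicate (t - (Nat.toDigits 2 i).length) '0' ++ Nat.toDigits 2 i = pvBits t i := by
  induction t, ht using Nat.le_induction with
  | base =>
    intro i hi
    interval_cases i
    · have h0 : Nat.toDigits 2 0 = ['0'] := rfl
      rw [h0]; decide
    · have h1 : Nat.toDigits 2 1 = ['1'] := rfl
      rw [h1]; decide
  | succ t ht ih =>
    intro i hi
    by_cases h2 : i < 2
    · have hd : i / 2 = 0 := by omega
      rw [pvBits_succ, hd, pvBits_zero_val]
      interval_cases i
      · have h0 : Nat.toDigits 2 0 = ['0'] := rfl
        rw [h0]; simp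
      · have h1 : Nat.toDigits 2 1 = ['1'] := rfl
        rw [h1]; simp
    · have hstep := pvToDigits_two_step i (by omega)
      rw [hstep, pvBits_succ]
      have hlen : (Nat.toDigits 2 (i / 2) ++ [Nat.digitChar (i % 2)]).length
          = (Nat.toDigits 2 (i / 2)).length + 1 := by simp
      rw [hlen, ← List.append_assoc]
      have hdiv : i / 2 < 2 ^ t := by
        have hp : (2 : Nat) ^ (t + 1) = 2 ^ t * 2 := by ring
        omega
      have heq : t + 1 - ((Nat.toDigits 2 (i / 2)).length + 1)
          = t - (Nat.toDigits 2 (i / 2)).length := by omega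
      rw [heq, ih (i / 2) hdiv]
      congr 1
      rcases Nat.mod_two_eq_zero_or_one i with hm | hm <;> rw [hm] <;> rfl

theorem pvZfill_bits (t i : Nat) (ht : 1 ≤ t) (h : i < 2 ^ t) :
    PySem.Chars.zfill (PySem.Int.toBinChars (i : Int)) (t : Int) = pvBits t i := by
  rw [pvZfill_eq]; exact pvBin_eq t ht i h

-- A's inner loop: the second state component counts the 'X's seen
theorem pvStepA_X (s : List Char) (st : Int × Nat) :
    pvStepA s st 'X' = (st.1 * 2 + pvDigit (PySem.List.pyGetD s (st.2 : Int) '0'), st.2 + 1) := rfl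

theorem pvStepA_ne (s : List Char) (st : Int × Nat) {c : Char} (hc : ¬ c = 'X') :
    pvStepA s st c = (st.1 * 2 + pvDigit c, st.2) := by
  unfold pvStepA; rw [if_neg hc]

theorem pvFoldA_snd (L : List Char) : ∀ (s : List Char) (st : Int × Nat),
    (L.foldl (pvStepA s) st).2 = st.2 + L.count 'X' := by
  induction L with
  | nil => intro s st; simp
  | cons c L ih =>
    intro s st
    rw [List.foldl_cons]
    by_cases hc : c = 'X'
    · subst hc
      rw [pvStepA_X, ih]
      simp
      omega
    · rw [pvStepA_ne s st hc, ih]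
      simp [hc]

-- A's inner loop reads only the first (at_x + #X) characters of the binary string
theorem pvFoldA_extend (L : List Char) : ∀ (s s' : List Char) (st : Int × Nat),
    st.2 + L.count 'X' ≤ s.length →
    L.foldl (pvStepA (s ++ s')) st = L.foldl (pvStepA s) st := by
  induction L with
  | nil => intro s s' st h; simp
  | cons c L ih =>
    intro s s' st h
    rw [List.foldl_cons, List.foldl_cons]
    by_cases hc : c = 'X'
    · subst hc
      rw [pvStepA_X, pvStepA_X]
      have hcnt : ('X' :: L).count 'X' = L.count 'X' + 1 := by simp
      have hlt : st.2 < s.length := by omega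
      have hget : PySem.List.pyGetD (s ++ s') (st.2 : Int) '0'
          = PySem.List.pyGetD s (st.2 : Int) '0' := by
        rw [PySem.List.pyGetD_natCast, PySem.List.pyGetD_natCast,
          List.getD_append _ _ _ _ hlt]
      rw [hget]
      exact ih s s' _ (by simp; omega)
    · rw [pvStepA_ne _ _ hc, pvStepA_ne _ _ hc]
      have hcnt : (c :: L).count 'X' = L.count 'X' := by simp [hc]
      exact ih s s' _ (by simp; omega)

theorem pvRangeDouble (N : Nat) (f : Nat → Int) :
    (List.range (2 * N)).map f = (List.range N).flatMap (fun q => [f (2 * q), f (2 * q + 1)]) := by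
  induction N with
  | zero => rfl
  | succ N ih =>
    have h1 : 2 * (N + 1) = (2 * N + 1) + 1 := by ring
    rw [h1, List.range_succ, List.range_succ, List.range_succ]
    simp only [List.map_append, List.flatMap_append, ih]
    simp [List.append_assoc]

theorem pvDigit_bit (q : Nat) :
    pvDigit (if q % 2 == 1 then '1' else '0') = ((q % 2 : Nat) : Int) := by
  rcases Nat.mod_two_eq_zero_or_one q with h | h <;> rw [h] <;> rfl

-- the heart: B's breadth-first expansion produces exactly A's addresses, in order
theorem pvExpand (L : List Char) :
    L.foldl pvStepB [0] =
      (List.range (2 ^ L.count 'X')).map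
        (fun q => (L.foldl (pvStepA (pvBits (L.count 'X') q)) ((0 : Int), (0 : Nat))).1) := by
  induction L using List.reverseRecOn with
  | nil => rfl
  | append_singleton L c ih =>
    rw [List.foldl_append]
    by_cases hc : c = 'X'
    · subst hc
      have hcnt : (L ++ ['X']).count 'X' = L.count 'X' + 1 := by simp
      rw [hcnt]
      have hRHS : (fun q : Nat =>
            ((L ++ ['X']).foldl (pvStepA (pvBits (L.count 'X' + 1) q)) ((0:Int),(0:Nat))).1)
          = (fun q : Nat =>
            (L.foldl (pvStepA (pvBits (L.count 'X') (q / 2))) ((0:Int),(0:Nat))).1 * 2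
              + ((q % 2 : Nat) : Int)) := by
        funext q
        rw [List.foldl_append, pvBits_succ,
          pvFoldA_extend L _ _ _ (by simp [pvBits_length]),
          List.foldl_cons, List.foldl_nil, pvStepA_X, pvFoldA_snd]
        have hg : PySem.List.pyGetD
            (pvBits (L.count 'X') (q / 2) ++ [if q % 2 == 1 then '1' else '0'])
            ((((0:Int),(0:Nat)).2 + L.count 'X' : Nat) : Int) '0'
            = (if q % 2 == 1 then '1' else '0') := by
          rw [PySem.List.pyGetD_natCast, List.getD_eq_getElem?_getD,
            show ((0:Int),(0:Nat)).2 + L.count 'X' = (pvBits (L.count 'X') (q / 2)).length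
              from by simp [pvBits_length],
            List.getElem?_concat_length]
          rfl
        rw [hg, pvDigit_bit]
      rw [hRHS, ih]
      have hBX : ∀ xs : List Int, pvStepB xs 'X' = xs.flatMap (fun p => [p * 2, p * 2 + 1]) :=
        fun xs => rfl
      rw [List.foldl_cons, List.foldl_nil, hBX, List.flatMap_map,
        show (2 : Nat) ^ (L.count 'X' + 1) = 2 * 2 ^ (L.count 'X') from by ring,
        pvRangeDouble]
      congr 1
      funext q
      have e1 : 2 * q / 2 = q := by omega
      have e2 : 2 * q % 2 = 0 := by omega
      have e3 : (2 * q + 1) / 2 = q := by omega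
      have e4 : (2 * q + 1) % 2 = 1 := by omega
      rw [e1, e2, e3, e4]
      simp
    · have hcnt : (L ++ [c]).count 'X' = L.count 'X' := by
        simp [List.count_append, hc]
      rw [hcnt]
      have hBne : ∀ xs : List Int, pvStepB xs c = xs.map (fun p => p * 2 + pvDigit c) := by
        intro xs; unfold pvStepB; rw [if_neg hc]
      rw [List.foldl_cons, List.foldl_nil, hBne, ih, List.map_map]
      have hRHS : (fun q : Nat =>
            ((L ++ [c]).foldl (pvStepA (pvBits (L.count 'X') q)) ((0:Int),(0:Nat))).1)
          = (fun q : Nat =>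
            (L.foldl (pvStepA (pvBits (L.count 'X') q)) ((0:Int),(0:Nat))).1 * 2 + pvDigit c) := by
        funext q
        rw [List.foldl_append, List.foldl_cons, List.foldl_nil, pvStepA_ne _ _ hc]
      rw [hRHS]
      rfl

-- ===== VERDICT (by name: the statement is the Claim_ definition above) =====
theorem set_all_values_spec : Claim_equal_set_all_values := by
  intro number value mem _hdom _hpre
  unfold Spec_set_all_values set_all_values set_all_values_alt
  show ((List.range (2 ^ PySem.Str.count number "X")).foldl
      (fun d i => d.insert
        ((number.toList.foldl
            (pvStepA (PySem.Chars.zfill (PySem.Int.toBinChars (i : Int))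
              ((PySem.Str.count number "X" : Nat) : Int)))
            ((0 : Int), (0 : Nat))).1)
        value)
      (PySem.Dict.mk mem)).items
    = ((number.toList.foldl pvStepB [(0 : Int)]).foldl
        (fun d a => d.insert a value) (PySem.Dict.mk mem)).items
  rw [pvCountX]
  have key : (List.range (2 ^ number.toList.count 'X')).map
      (fun (i : Nat) => (number.toList.foldl
          (pvStepA (PySem.Chars.zfill (PySem.Int.toBinChars (i : Int))
            ((number.toList.count 'X' : Nat) : Int)))
          ((0 : Int), (0 : Nat))).1)
      = number.toList.foldl pvStepB [(0 : Int)] := by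
    rw [pvExpand]
    apply List.map_congr_left
    intro i hi
    have hi' : i < 2 ^ number.toList.count 'X' := List.mem_range.mp hi
    by_cases ht : 1 ≤ number.toList.count 'X'
    · rw [pvZfill_bits _ _ ht hi']
    · have ht0 : number.toList.count 'X' = 0 := by omega
      rw [ht0] at hi' ⊢
      interval_cases i
      have h1 : PySem.Chars.zfill (PySem.Int.toBinChars (((0 : Nat)) : Int)) (((0 : Nat)) : Int)
          = [] ++ ['0'] := by decide
      have h2 : pvBits 0 0 = ([] : List Char) := rfl
      rw [h1, h2, pvFoldA_extend _ _ _ _ (by simp [ht0])]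
  rw [← key, List.foldl_map]
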